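-- pv_equiv track=rewrite | github.com/jouniluoma/bert-ner-cmv | common.py | combine_sentences
-- ===== SOURCE A (Python) =====
-- def combine_sentences(lines, tags, lengths, max_seq):
--     lines_in_sample = []
--     new_lines = []
--     new_tags = []
--
--     for i, line in enumerate(lines):
--         line_numbers = [i]
--         new_line = []
--         new_line.extend(line)
--         new_tag = []
--         new_tag.extend(tags[i])
--         j = 1
--         linelen = len(lines[(i+j)%len(lines)])
--         while (len(new_line) + linelen) < max_seq-2:
--             new_line.append('[SEP]')
--             new_tag.append('O')
--             new_line.extend(lines[(i+j)%len(lines)])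
--             new_tag.extend(tags[(i+j)%len(tags)])
--             line_numbers.append((i+j)%len(lines))
--             j += 1
--             linelen = len(lines[(i+j)%len(lines)])
--         new_lines.append(new_line)
--         new_tags.append(new_tag)
--         lines_in_sample.append(line_numbers)
--     return new_lines, new_tags, lines_in_sample
-- ===== SOURCE B (Python) =====
-- def combine_sentences(lines, tags, lengths, max_seq):
--     n = len(lines)
--     # First pass: decide each window purely arithmetically — for start i, count
--     # how many following sentences (with wraparound) fit, tracking only a running length.
--     windows = []
--     for i in range(n):
--         runlen = len(lines[i])
--         m = 0
--         while runlen + len(lines[(i + m + 1) % n]) < max_seq - 2: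
--             runlen += 1 + len(lines[(i + m + 1) % n])
--             m += 1
--         windows.append((i, m))
--     # Second pass: materialize the token/tag windows from the recorded (start, count) pairs.
--     new_lines = []
--     new_tags = []
--     lines_in_sample = []
--     for i, m in windows:
--         new_line = list(lines[i])
--         new_tag = list(tags[i])
--         nums = [i]
--         for j in range(1, m + 1):
--             new_line += ['[SEP]'] + lines[(i + j) % n]
--             new_tag += ['O'] + tags[(i + j) % len(tags)]
--             nums.append((i + j) % n)
--         new_lines.append(new_line)
--         new_tags.append(new_tag)
--         lines_in_sample.append(nums)
--     return new_lines, new_tags, lines_in_sample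
-- ===== Notes on version B (the rewrite author's own statement) =====
-- stated objective: alternative
-- what changed: B splits A's single accumulating loop into two passes: a first pass that records only (start index, extension count) per window using an integer running length, and a second pass that materializes the token/tag windows from those pairs.
import Mathlib
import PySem

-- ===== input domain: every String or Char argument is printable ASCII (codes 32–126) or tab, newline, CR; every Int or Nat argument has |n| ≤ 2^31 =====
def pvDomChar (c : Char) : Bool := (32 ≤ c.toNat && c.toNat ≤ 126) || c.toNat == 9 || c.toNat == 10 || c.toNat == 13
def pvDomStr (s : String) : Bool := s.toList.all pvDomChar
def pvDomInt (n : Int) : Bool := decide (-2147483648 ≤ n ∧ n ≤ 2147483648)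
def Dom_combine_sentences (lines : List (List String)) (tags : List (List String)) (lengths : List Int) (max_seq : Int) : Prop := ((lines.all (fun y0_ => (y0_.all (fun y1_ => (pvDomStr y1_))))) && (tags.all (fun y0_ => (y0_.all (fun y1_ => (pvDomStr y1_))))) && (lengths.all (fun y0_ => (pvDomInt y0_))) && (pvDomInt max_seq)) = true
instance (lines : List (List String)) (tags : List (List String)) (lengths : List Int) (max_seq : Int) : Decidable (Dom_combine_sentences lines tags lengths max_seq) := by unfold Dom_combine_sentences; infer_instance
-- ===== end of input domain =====

-- B re-implements A in two passes (first record (start, count) windows using only a running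
-- length, then materialize tokens/tags); same return value on Pre_, no speed claim.

-- ===== PORT A =====
-- xs[(i+j) % len(xs)]: the index is the Python mod, nonnegative and < len(xs) whenever xs ≠ [],
-- so pyGetD with a default is exact wherever A evaluates it.
def pvIdx (xs : List (List String)) (k : Int) : List String :=
  PySem.List.pyGetD xs (PySem.Int.mod k (xs.length : Int)) []

-- Termination measures for the two while loops (named so the proof term stays small).
theorem pvDecrA (len ll : Nat) (ms : Int) (h : (len : Int) + (ll : Int) < ms - 2) :
    (ms - 2 - ((len + (ll + 1) : Nat) : Int)).toNat < (ms - 2 - (len : Int)).toNat := by omega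

-- A's inner while loop: state (new_line, new_tag, line_numbers, j).
def pvAInner (lines tags : List (List String)) (max_seq i : Int)
    (nl nt : List String) (nums : List Int) (j : Int) :
    List String × List String × List Int :=
  if h : (nl.length : Int) + ((pvIdx lines (i + j)).length : Int) < max_seq - 2 then
    pvAInner lines tags max_seq i
      (nl ++ "[SEP]" :: pvIdx lines (i + j))
      (nt ++ "O" :: pvIdx tags (i + j))
      (nums ++ [PySem.Int.mod (i + j) (lines.length : Int)])
      (j + 1)
  else (nl, nt, nums)
termination_by (max_seq - 2 - (nl.length : Int)).toNat
decreasing_by simp only [List.length_append, List.length_cons]; exact pvDecrA _ _ _ h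

-- tags[i]: plain indexing; Pre_ keeps i in range, where pyGetD is exact.
def combine_sentences (lines : List (List String)) (tags : List (List String)) (lengths : List Int) (max_seq : Int) : List (List String) × List (List String) × List (List Int) :=
  (PySem.List.enumerate lines).foldl
    (fun acc p =>
      (acc.1 ++ [(pvAInner lines tags max_seq p.1 p.2 (PySem.List.pyGetD tags p.1 []) [p.1] 1).1],
       acc.2.1 ++ [(pvAInner lines tags max_seq p.1 p.2 (PySem.List.pyGetD tags p.1 []) [p.1] 1).2.1],
       acc.2.2 ++ [(pvAInner lines tags max_seq p.1 p.2 (PySem.List.pyGetD tags p.1 []) [p.1] 1).2.2]))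
    ([], [], [])

-- ===== PORT B =====
theorem pvDecrB (runlen ms : Int) (ll : Nat) (h : runlen + (ll : Int) < ms - 2) :
    (ms - 2 - (runlen + 1 + (ll : Int))).toNat < (ms - 2 - runlen).toNat := by omega

-- First pass's while loop: only the running length and the extension count m.
def pvBCount (lines : List (List String)) (max_seq i runlen m : Int) : Int :=
  if h : runlen + ((pvIdx lines (i + m + 1)).length : Int) < max_seq - 2 then
    pvBCount lines max_seq i (runlen + 1 + ((pvIdx lines (i + m + 1)).length : Int)) (m + 1)
  else m
termination_by (max_seq - 2 - runlen).toNat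
decreasing_by exact pvDecrB _ _ _ h

-- Second pass's inner for-loop body (j runs over range(1, m+1)).
def pvStep (lines tags : List (List String)) (i : Int)
    (s : List String × List String × List Int) (j : Int) :
    List String × List String × List Int :=
  (s.1 ++ "[SEP]" :: pvIdx lines (i + j),
   s.2.1 ++ "O" :: pvIdx tags (i + j),
   s.2.2 ++ [PySem.Int.mod (i + j) (lines.length : Int)])

-- Second pass: materialize one window from its (start, count) pair.
def pvBWindow (lines tags : List (List String)) (max_seq i m : Int) :
    List String × List String × List Int :=
  (PySem.List.pyRange 1 (m + 1)).foldl (pvStep lines tags i)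
    (PySem.List.pyGetD lines i [], PySem.List.pyGetD tags i [], [i])

def combine_sentences_alt (lines : List (List String)) (tags : List (List String)) (lengths : List Int) (max_seq : Int) : List (List String) × List (List String) × List (List Int) :=
  ((PySem.List.pyRange 0 (lines.length : Int)).foldl
      (fun w i =>
        w ++ [(i, pvBCount lines max_seq i ((PySem.List.pyGetD lines i []).length : Int) 0)])
      ([] : List (Int × Int))).foldl
    (fun acc p =>
      (acc.1 ++ [(pvBWindow lines tags max_seq p.1 p.2).1],
       acc.2.1 ++ [(pvBWindow lines tags max_seq p.1 p.2).2.1],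
       acc.2.2 ++ [(pvBWindow lines tags max_seq p.1 p.2).2.2]))
    ([], [], [])

-- ===== PRECONDITION & SPEC =====
-- A raises IndexError (at tags[i]) exactly when tags is shorter than lines; those inputs are excluded.
def Pre_combine_sentences (lines : List (List String)) (tags : List (List String)) (lengths : List Int) (max_seq : Int) : Prop :=
  lines.length ≤ tags.length
instance (lines : List (List String)) (tags : List (List String)) (lengths : List Int) (max_seq : Int) : Decidable (Pre_combine_sentences lines tags lengths max_seq) := by unfold Pre_combine_sentences; infer_instance
def pvWitness_combine_sentences : List (List String) × List (List String) × List Int × Int :=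
  ([["a", "b"], ["c"]], [["O", "O"], ["B"]], [2, 1], 7)
def Spec_combine_sentences (lines : List (List String)) (tags : List (List String)) (lengths : List Int) (max_seq : Int) (out : List (List String) × List (List String) × List (List Int)) : Prop := out = combine_sentences_alt lines tags lengths max_seq
instance (lines : List (List String)) (tags : List (List String)) (lengths : List Int) (max_seq : Int) (out : List (List String) × List (List String) × List (List Int)) : Decidable (Spec_combine_sentences lines tags lengths max_seq out) := by unfold Spec_combine_sentences; infer_instance

-- ===== CLAIM (what is proved, stated in full; the proofs are below) =====
def Claim_equal_combine_sentences : Prop := ∀ (lines : List (List String)) (tags : List (List String)) (lengths : List Int) (max_seq : Int), Dom_combine_sentences lines tags lengths max_seq → Pre_combine_sentences lines tags lengths max_seq → Spec_combine_sentences lines tags lengths max_seq (combine_sentences lines tags lengths max_seq)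

-- ===== LEMMAS AND PROOFS =====

-- pvBCount only ever increments its counter.
theorem pvBCount_ge (lines : List (List String)) (max_seq i runlen m : Int) :
    m ≤ pvBCount lines max_seq i runlen m := by
  fun_induction pvBCount with
  | case1 runlen m h ih => omega
  | case2 runlen m h => omega

-- The crux: A's accumulating while loop equals B's "count first, build later" decomposition,
-- for any loop state whose recorded running length is the real length of new_line.
theorem pvMain (lines tags : List (List String)) (max_seq i : Int)
    (nl nt : List String) (nums : List Int) (j : Int) :
    pvAInner lines tags max_seq i nl nt nums j =
      (PySem.List.pyRange j (pvBCount lines max_seq i (nl.length : Int) (j - 1) + 1)).foldl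
        (pvStep lines tags i) (nl, nt, nums) := by
  fun_induction pvAInner with
  | case1 nl nt nums j h ih =>
    rw [ih]
    have hidx : i + (j - 1) + 1 = i + j := by ring
    have e1 : (nl.length : Int) + 1 + ((pvIdx lines (i + j)).length : Int)
        = (((nl ++ "[SEP]" :: pvIdx lines (i + j)).length : Int)) := by
      simp only [List.length_append, List.length_cons]; push_cast; ring
    have hcnt : pvBCount lines max_seq i (nl.length : Int) (j - 1) =
        pvBCount lines max_seq i (((nl ++ "[SEP]" :: pvIdx lines (i + j)).length : Int)) ((j + 1) - 1) := by
      conv_lhs => rw [pvBCount.eq_def]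
      rw [hidx, dif_pos h, e1]
      norm_num
    rw [← hcnt]
    have hge : j ≤ pvBCount lines max_seq i (nl.length : Int) (j - 1) := by
      have h2 := pvBCount_ge lines max_seq i
        ((nl.length : Int) + 1 + ((pvIdx lines (i + j)).length : Int)) (j - 1 + 1)
      have h3 : pvBCount lines max_seq i (nl.length : Int) (j - 1) =
          pvBCount lines max_seq i
            ((nl.length : Int) + 1 + ((pvIdx lines (i + j)).length : Int)) (j - 1 + 1) := by
        conv_lhs => rw [pvBCount.eq_def]
        rw [hidx, dif_pos h]
      omega
    conv_rhs => rw [PySem.List.pyRange_one_cons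
      (show j < pvBCount lines max_seq i (nl.length : Int) (j - 1) + 1 by omega)]
    rw [List.foldl_cons]
    rfl
  | case2 nl nt nums j h =>
    have hidx : i + (j - 1) + 1 = i + j := by ring
    conv_rhs => rw [pvBCount.eq_def]
    rw [hidx, dif_neg h]
    rw [show j - 1 + 1 = j from by ring, PySem.List.pyRange_one_eq_nil (by omega)]
    rfl

theorem combine_sentences_eq (lines tags : List (List String)) (lengths : List Int) (max_seq : Int) :
    combine_sentences lines tags lengths max_seq = combine_sentences_alt lines tags lengths max_seq := by
  unfold combine_sentences combine_sentences_alt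
  rw [PySem.List.foldl_append_singleton_eq_map, List.nil_append]
  rw [PySem.List.enumerate_eq_map_pyRange lines ([] : List String)]
  rw [PySem.List.len_eq, List.foldl_map, List.foldl_map]
  apply PySem.List.foldl_congr_mem
  intro acc x _
  have hpt : pvAInner lines tags max_seq x (PySem.List.pyGetD lines x []) (PySem.List.pyGetD tags x []) [x] 1
      = pvBWindow lines tags max_seq x
          (pvBCount lines max_seq x ((PySem.List.pyGetD lines x []).length : Int) 0) := by
    rw [pvMain]
    norm_num [pvBWindow]
  simp [hpt]

-- ===== VERDICT (by name: the statement is the Claim_ definition above) =====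
theorem combine_sentences_spec : Claim_equal_combine_sentences := by
  intro lines tags lengths max_seq _ _
  unfold Spec_combine_sentences
  exact combine_sentences_eq lines tags lengths max_seq
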